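-- pv_equiv track=rewrite | github.com/danizu001/Estadistica_Computancional_Python | poker.py | ProbabilidadPar
-- ===== SOURCE A (Python) =====
-- import collections
--
-- def ProbabilidadPar(manos):
--     pares=0
--     for i in manos:
--         valores=[]
--         for j in i:
--             valores.append(j[1])
--         counter=dict(collections.Counter(valores))
--         for i in counter.values():
--             if i==2:
--                 pares+=1
--                 break
--     return pares
-- ===== SOURCE B (Python) =====
-- def ProbabilidadPar(manos):
--     pares = 0
--     for mano in manos:
--         vs = sorted(c[1] for c in mano)
--         i, n = 0, len(vs)
--         while i < n:
--             j = i + 1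
--             while j < n and vs[j] == vs[i]:
--                 j += 1
--             if j - i == 2:
--                 pares += 1
--                 break
--             i = j
--     return pares
-- ===== Notes on version B (the rewrite author's own statement) =====
-- stated objective: alternative
-- what changed: Replaces the Counter-dict of value frequencies with sorting each hand's values and scanning the sorted list for a run of exactly length 2 (early break preserved).
import Mathlib
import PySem

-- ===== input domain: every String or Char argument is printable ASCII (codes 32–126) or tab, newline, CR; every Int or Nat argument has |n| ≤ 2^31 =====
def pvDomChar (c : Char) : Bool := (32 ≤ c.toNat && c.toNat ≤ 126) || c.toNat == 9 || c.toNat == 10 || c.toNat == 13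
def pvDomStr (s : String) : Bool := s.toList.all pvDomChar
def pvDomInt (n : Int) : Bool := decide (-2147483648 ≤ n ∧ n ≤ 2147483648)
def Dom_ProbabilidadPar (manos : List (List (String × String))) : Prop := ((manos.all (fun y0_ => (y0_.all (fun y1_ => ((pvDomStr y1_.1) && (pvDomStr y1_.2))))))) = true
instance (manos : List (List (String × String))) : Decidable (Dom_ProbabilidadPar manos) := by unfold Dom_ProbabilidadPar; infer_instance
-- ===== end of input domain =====

-- B sorts each hand's values and scans the sorted list for a run of exactly two equal
-- values, instead of A's Counter dictionary; same count==2 test, one increment per hand.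

-- ===== PORT A =====
-- the inner 'for i in counter.values(): if i == 2: pares += 1; break' loop
def pvAnyEq2 : List Int → Bool
  | [] => false
  | c :: rest => if c == 2 then true else pvAnyEq2 rest

def ProbabilidadPar (manos : List (List (String × String))) : Int :=
  manos.foldl (fun pares i =>
    let valores := i.foldl (fun acc j => acc ++ [j.2]) []
    let counter := PySem.Dict.counter valores
    if pvAnyEq2 counter.values then pares + 1 else pares) 0

-- ===== PORT B =====
-- the index-scan while loop of Source B over the sorted value list: measure the run of
-- equal values at position i (vs[i..j)), succeed iff its length is exactly 2, else
-- continue at j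
def pvHasPairRun : List String → Bool
  | [] => false
  | v :: rest =>
      if (rest.takeWhile (fun x => x == v)).length + 1 == 2 then true
      else pvHasPairRun (rest.dropWhile (fun x => x == v))
termination_by l => l.length
decreasing_by
  simpa using Nat.lt_succ_of_le (List.Sublist.length_le (List.dropWhile_sublist _))

def ProbabilidadPar_alt (manos : List (List (String × String))) : Int :=
  manos.foldl (fun pares mano =>
    let vs := PySem.List.sorted (mano.map (fun c => c.2)) (fun x => x) false
    if pvHasPairRun vs then pares + 1 else pares) 0

-- ===== PRECONDITION & SPEC =====
def Spec_ProbabilidadPar (manos : List (List (String × String))) (out : Int) : Prop := out = ProbabilidadPar_alt manos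
instance (manos : List (List (String × String))) (out : Int) : Decidable (Spec_ProbabilidadPar manos out) := by unfold Spec_ProbabilidadPar; infer_instance

-- ===== CLAIM (what is proved, stated in full; the proofs are below) =====
def Claim_equal_ProbabilidadPar : Prop := ∀ (manos : List (List (String × String))), Dom_ProbabilidadPar manos → Spec_ProbabilidadPar manos (ProbabilidadPar manos)

-- ===== LEMMAS AND PROOFS =====

-- every element of the dropWhile suffix differs from the run head (sorted input)
theorem drop_ne (v : String) (rest : List String)
    (h : (v :: rest).Pairwise (· ≤ ·)) :
    ∀ x ∈ rest.dropWhile (fun x => x == v), x ≠ v := by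
  cases hd : rest.dropWhile (fun x => x == v) with
  | nil => simp
  | cons w ds =>
    have hsub : (w :: ds).Sublist rest := hd ▸ List.dropWhile_sublist _
    have hvle : ∀ x ∈ rest, v ≤ x := (List.pairwise_cons.mp h).1
    have hw : ¬ ((w == v) = true) := by
      have := List.head_dropWhile_not (p := fun x => x == v) (l := rest) (by simp [hd])
      simpa [hd] using this
    have hwv : w ≠ v := by simpa using hw
    have hvw : v < w := lt_of_le_of_ne (hvle w (hsub.mem (by simp))) (Ne.symm hwv)
    have hpw : (w :: ds).Pairwise (· ≤ ·) := ((List.pairwise_cons.mp h).2).sublist hsub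
    intro x hx
    rcases List.mem_cons.mp hx with rfl | hx
    · exact hwv
    · have hle : w ≤ x := (List.pairwise_cons.mp hpw).1 x hx
      intro he
      subst he
      exact absurd (lt_of_lt_of_le hvw hle) (lt_irrefl x)

theorem count_takeWhile_self (v : String) (rest : List String) :
    (rest.takeWhile (fun x => x == v)).count v = (rest.takeWhile (fun x => x == v)).length := by
  apply List.count_eq_length.mpr
  intro b hb
  have := List.mem_takeWhile_imp hb
  simp at this
  exact this.symm

-- in a sorted list the head's multiplicity is one plus the run length
theorem count_head_run (v : String) (rest : List String)
    (h : (v :: rest).Pairwise (· ≤ ·)) :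
    (v :: rest).count v = (rest.takeWhile (fun x => x == v)).length + 1 := by
  have h0 : (rest.dropWhile (fun x => x == v)).count v = 0 :=
    List.count_eq_zero.mpr (fun hm => drop_ne v rest h v hm rfl)
  have hsplit : List.count v rest
      = List.count v (rest.takeWhile (fun x => x == v)) + List.count v (rest.dropWhile (fun x => x == v)) := by
    conv_lhs => rw [← List.takeWhile_append_dropWhile (p := fun x => x == v) (l := rest)]
    rw [List.count_append]
  rw [List.count_cons_self, hsplit, h0, count_takeWhile_self]

-- multiplicities of suffix elements are unchanged by dropping the head run
theorem count_in_drop (v : String) (rest : List String) (u : String)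
    (hu : u ∈ rest.dropWhile (fun x => x == v))
    (h : (v :: rest).Pairwise (· ≤ ·)) :
    (v :: rest).count u = (rest.dropWhile (fun x => x == v)).count u := by
  have huv : u ≠ v := drop_ne v rest h u hu
  have ht : (rest.takeWhile (fun x => x == v)).count u = 0 := by
    apply List.count_eq_zero.mpr
    intro hm
    have := List.mem_takeWhile_imp hm
    simp at this
    exact huv this
  have hsplit : List.count u rest
      = List.count u (rest.takeWhile (fun x => x == v)) + List.count u (rest.dropWhile (fun x => x == v)) := by
    conv_lhs => rw [← List.takeWhile_append_dropWhile (p := fun x => x == v) (l := rest)]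
    rw [List.count_append]
  rw [List.count_cons_of_ne (Ne.symm huv), hsplit, ht, Nat.zero_add]

-- B's per-hand scan on a sorted list decides 'some value occurs exactly twice'
theorem hand_pred_B (l : List String) (h : l.Pairwise (· ≤ ·)) :
    pvHasPairRun l = l.any (fun v => l.count v == 2) := by
  induction l using pvHasPairRun.induct with
  | case1 => simp [pvHasPairRun]
  | case2 v rest hif =>
    have hp : ((v :: rest).count v == 2) = true := by
      rw [count_head_run v rest h]; simpa using hif
    simp only [pvHasPairRun, hif, if_true]
    exact (List.any_eq_true.mpr ⟨v, by simp, hp⟩).symm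
  | case3 v rest hif ih =>
    have hpd : (rest.dropWhile (fun x => x == v)).Pairwise (· ≤ ·) :=
      ((List.pairwise_cons.mp h).2).sublist (List.dropWhile_sublist _)
    have hlen : ¬ (((rest.takeWhile (fun x => x == v)).length + 1) = 2) := by
      simpa using hif
    rw [show pvHasPairRun (v :: rest) = pvHasPairRun (rest.dropWhile (fun x => x == v)) by
      simp [pvHasPairRun, hif], ih hpd]
    rw [Bool.eq_iff_iff]
    simp only [List.any_eq_true, beq_iff_eq]
    constructor
    · rintro ⟨u, hu, hc⟩
      refine ⟨u, List.mem_cons_of_mem v ((List.dropWhile_sublist _).mem hu), ?_⟩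
      rw [count_in_drop v rest u hu h]; exact hc
    · rintro ⟨u, hu, hc⟩
      rcases List.mem_cons.mp hu with rfl | hu2
      · exact absurd (count_head_run u rest h ▸ hc) hlen
      · by_cases hud : u ∈ rest.dropWhile (fun x => x == v)
        · exact ⟨u, hud, by rw [← count_in_drop v rest u hud h]; exact hc⟩
        · have hut : u ∈ rest.takeWhile (fun x => x == v) := by
            have := List.takeWhile_append_dropWhile (p := fun x => x == v) (l := rest)
            rw [← this] at hu2
            rcases List.mem_append.mp hu2 with h1 | h1
            · exact h1
            · exact absurd h1 hud
          have huv : u = v := by simpa using List.mem_takeWhile_imp hut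
          subst huv
          exact absurd (count_head_run u rest h ▸ hc) hlen

theorem pvAnyEq2_eq_any (l : List Int) : pvAnyEq2 l = l.any (fun c => c == 2) := by
  induction l with
  | nil => rfl
  | cons c rest ih => by_cases hc : c = 2 <;> simp [pvAnyEq2, ih, hc]

-- A's per-hand Counter test decides 'some value occurs exactly twice'
theorem hand_pred_A (vs : List String) :
    pvAnyEq2 (PySem.Dict.counter vs).values = vs.any (fun v => vs.count v == 2) := by
  rw [pvAnyEq2_eq_any]
  have hv : (PySem.Dict.counter vs).values
      = (PySem.Set.ofList vs).map (fun k => (vs.count k : Int)) := by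
    simp [PySem.Dict.values, PySem.Dict.items_counter]
  rw [hv, List.any_map, Bool.eq_iff_iff]
  simp only [List.any_eq_true, PySem.Set.mem_ofList, Function.comp]
  constructor
  · rintro ⟨k, hk, h2⟩
    exact ⟨k, hk, by simp at h2 ⊢; exact_mod_cast h2⟩
  · rintro ⟨k, hk, h2⟩
    exact ⟨k, hk, by simp at h2 ⊢; exact_mod_cast h2⟩

theorem foldl_append_snd (mano : List (String × String)) (acc : List String) :
    mano.foldl (fun acc j => acc ++ [j.2]) acc = acc ++ mano.map (fun c => c.2) := by
  induction mano generalizing acc with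
  | nil => simp
  | cons p rest ih => simp [List.foldl_cons, ih]

-- the two per-hand tests agree
theorem hand_bool (mano : List (String × String)) :
    pvAnyEq2 (PySem.Dict.counter (mano.foldl (fun acc j => acc ++ [j.2]) [])).values
      = pvHasPairRun (PySem.List.sorted (mano.map (fun c => c.2)) (fun x => x) false) := by
  rw [foldl_append_snd, List.nil_append, hand_pred_A]
  have hpair : (PySem.List.sorted (mano.map (fun c => c.2)) (fun x => x) false).Pairwise (· ≤ ·) := by
    simpa using PySem.List.sorted_pairwise (xs := mano.map (fun c => c.2)) (key := fun x => x)
  rw [hand_pred_B _ hpair, Bool.eq_iff_iff]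
  have hperm : (PySem.List.sorted (mano.map (fun c => c.2)) (fun x => x) false).Perm (mano.map (fun c => c.2)) :=
    PySem.List.sorted_perm ..
  simp only [List.any_eq_true, beq_iff_eq]
  constructor
  · rintro ⟨u, hu, hc⟩
    exact ⟨u, hperm.mem_iff.mpr hu, by rw [hperm.count_eq]; exact hc⟩
  · rintro ⟨u, hu, hc⟩
    exact ⟨u, hperm.mem_iff.mp hu, by rw [← hperm.count_eq]; exact hc⟩

theorem fold_eq (manos : List (List (String × String))) (p : Int) :
    manos.foldl (fun pares i =>
      let valores := i.foldl (fun acc j => acc ++ [j.2]) []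
      let counter := PySem.Dict.counter valores
      if pvAnyEq2 counter.values then pares + 1 else pares) p
    = manos.foldl (fun pares mano =>
      let vs := PySem.List.sorted (mano.map (fun c => c.2)) (fun x => x) false
      if pvHasPairRun vs then pares + 1 else pares) p := by
  induction manos generalizing p with
  | nil => rfl
  | cons m rest ih =>
    simp only [List.foldl_cons]
    rw [show (if pvAnyEq2 (PySem.Dict.counter (m.foldl (fun acc j => acc ++ [j.2]) [])).values then p + 1 else p)
        = (if pvHasPairRun (PySem.List.sorted (m.map (fun c => c.2)) (fun x => x) false) then p + 1 else p) by
      rw [hand_bool m]]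
    exact ih _

-- ===== VERDICT (by name: the statement is the Claim_ definition above) =====
theorem ProbabilidadPar_spec : Claim_equal_ProbabilidadPar := by
  intro manos _
  unfold Spec_ProbabilidadPar ProbabilidadPar ProbabilidadPar_alt
  exact fold_eq manos 0
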